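-- pv_equiv track=rewrite | github.com/kaffeeMn/WS1819 | rst/update_todo.py | gen_html_table_file
-- ===== SOURCE A (Python) =====
-- def gen_html_table_file(dict):
--     table = '<table class="table"><tr>'
--     for k in dict.keys():
--         table += '<th>{}</th>'.format(k)
--     table += '</tr>'
--     for i in range(max([len(dict[k]) for k in dict.keys()])):
--         table += '<tr>'
--         for k in dict.keys():
--             if len(dict[k]) <= i:
--                 table += '<td></td>'
--             else:
--                 table += '<td>{}</td>'.format(dict[k][i])
--         table += '</tr>'
--     table += '</table>'
--     return '''
--         <html>
--         <head>
--             <link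
--             rel="stylesheet"
--             href="https://maxcdn.bootstrapcdn.com/bootstrap/4.0.0/css/bootstrap.min.css"
--             />
--         </head>
--         <body>
--         {}
--         </body>
--         </html>
--         '''.format(table)
-- ===== SOURCE B (Python) =====
-- def gen_html_table_file(dict):
--     n = max([len(v) for v in dict.values()])
--     header = ''
--     rows = [[] for _ in range(n)]
--     for k, col in dict.items():
--         header += '<th>{}</th>'.format(k)
--         padded = ['<td>{}</td>'.format(x) for x in col] \
--             + ['<td></td>'] * (n - len(col))
--         for r, c in zip(rows, padded):
--             r.append(c)
--     table = '<table class="table"><tr>' + header + '</tr>'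
--     for r in rows:
--         table += '<tr>'
--         for c in r:
--             table += c
--         table += '</tr>'
--     table += '</table>'
--     return '''
--         <html>
--         <head>
--             <link
--             rel="stylesheet"
--             href="https://maxcdn.bootstrapcdn.com/bootstrap/4.0.0/css/bootstrap.min.css"
--             />
--         </head>
--         <body>
--         {}
--         </body>
--         </html>
--         '''.format(table)
-- ===== Notes on version B (the rewrite author's own statement) =====
-- stated objective: alternative
-- what changed: B traverses the table column-major: a single pass over dict.items() that pads each column once to the max length and appends the column's cells to per-row cell lists via zip, instead of A's row-major index loop that re-scans every column per row with a per-cell bounds check.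
import Mathlib
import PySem

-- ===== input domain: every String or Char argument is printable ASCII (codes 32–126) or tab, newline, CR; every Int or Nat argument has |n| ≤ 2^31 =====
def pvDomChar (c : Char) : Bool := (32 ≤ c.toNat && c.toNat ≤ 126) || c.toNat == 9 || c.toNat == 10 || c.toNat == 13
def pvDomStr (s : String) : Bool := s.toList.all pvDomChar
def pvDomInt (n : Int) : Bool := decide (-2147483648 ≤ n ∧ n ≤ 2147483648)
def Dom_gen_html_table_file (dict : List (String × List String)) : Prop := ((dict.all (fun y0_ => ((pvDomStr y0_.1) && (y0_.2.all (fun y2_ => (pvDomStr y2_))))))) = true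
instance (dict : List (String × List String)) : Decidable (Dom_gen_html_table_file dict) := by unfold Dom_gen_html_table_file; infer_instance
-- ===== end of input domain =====

-- B builds the table column-major in one pass (each column padded once, all row strings extended
-- together) instead of A's row-major index loop with per-cell bounds checks (objective: alternative).

-- the HTML page template both Pythons wrap the table in ('''…'''.format(table))
def pvPageWrap (table : String) : String :=
  "\n        <html>\n        <head>\n            <link \n            rel=\"stylesheet\" \n            href=\"https://maxcdn.bootstrapcdn.com/bootstrap/4.0.0/css/bootstrap.min.css\"\n            />\n        </head>\n        <body>\n        "
  ++ table ++ "\n        </body>\n        </html>\n        "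

-- ===== PORT A =====
def gen_html_table_file (dict : List (String × List String)) : String :=
  let d := PySem.Dict.ofList dict
  let table0 := d.keys.foldl (fun t k => t ++ "<th>" ++ k ++ "</th>") "<table class=\"table\"><tr>"
  let table1 := table0 ++ "</tr>"
  let lens := d.keys.map (fun k => ((d.getD k []).length : Int))
  -- max([]) raises ValueError in Python: Pre_ excludes dict = [], .getD 0 is never reached there
  let m := (PySem.List.max? lens (fun y => y)).getD 0
  let table2 := (PySem.List.pyRange 0 m 1).foldl (fun t i =>
      (d.keys.foldl (fun t k =>
          if ((d.getD k []).length : Int) ≤ i then t ++ "<td></td>"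
          else t ++ "<td>" ++ PySem.List.pyGetD (d.getD k []) i "" ++ "</td>")
        (t ++ "<tr>")) ++ "</tr>") table1
  pvPageWrap (table2 ++ "</table>")

-- ===== PORT B =====
def gen_html_table_file_alt (dict : List (String × List String)) : String :=
  let d := PySem.Dict.ofList dict
  -- n = max([len(v) for v in dict.values()]): ValueError on the empty dict is excluded by Pre_;
  -- lengths are ≥ 0 so toNat is exact
  let n := ((PySem.List.max? (d.values.map (fun v => (v.length : Int))) (fun y => y)).getD 0).toNat
  -- single pass over dict.items(): grow the header and append this column's cell to every row's
  -- cell list; the in-place r.append(c) over zip(rows, padded) is ported as zipWith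
  -- (Nat subtraction clamps at 0 exactly as Python's ['<td></td>'] * negative gives [])
  let hr := d.items.foldl (fun (p : String × List (List String)) kv =>
      let padded := kv.2.map (fun x => "<td>" ++ x ++ "</td>")
                    ++ List.replicate (n - kv.2.length) "<td></td>"
      (p.1 ++ "<th>" ++ kv.1 ++ "</th>", p.2.zipWith (fun r c => r ++ [c]) padded))
    ("", List.replicate n ([] : List String))
  let table0 := "<table class=\"table\"><tr>" ++ hr.1 ++ "</tr>"
  let table1 := hr.2.foldl (fun t r =>
      (r.foldl (fun t c => t ++ c) (t ++ "<tr>")) ++ "</tr>") table0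
  pvPageWrap (table1 ++ "</table>")

-- ===== PRECONDITION & SPEC =====
-- Pre_ excludes only the empty dict, on which both A's and B's max([]) raise ValueError.
def Pre_gen_html_table_file (dict : List (String × List String)) : Prop := dict ≠ []
instance (dict : List (String × List String)) : Decidable (Pre_gen_html_table_file dict) := by
  unfold Pre_gen_html_table_file; infer_instance

def pvWitness_gen_html_table_file : (List (String × List String)) := [("a", ["1", "2"]), ("b", ["x"])]

def Spec_gen_html_table_file (dict : List (String × List String)) (out : String) : Prop := out = gen_html_table_file_alt dict
instance (dict : List (String × List String)) (out : String) : Decidable (Spec_gen_html_table_file dict out) := by unfold Spec_gen_html_table_file; infer_instance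

-- ===== CLAIM (what is proved, stated in full; the proofs are below) =====
def Claim_equal_gen_html_table_file : Prop := ∀ (dict : List (String × List String)), Dom_gen_html_table_file dict → Pre_gen_html_table_file dict → Spec_gen_html_table_file dict (gen_html_table_file dict)

-- ===== LEMMAS AND PROOFS =====

def pvCell (i : Nat) (c : List String) : String := "<td>" ++ c.getD i "" ++ "</td>"
def pvRowStr (vals : List (List String)) (i : Nat) : String :=
  "<tr>" ++ vals.foldl (fun b c => b ++ pvCell i c) "" ++ "</tr>"

-- pulling the initial accumulator out of a string-building foldl
theorem pv_shift0 {α : Type} (g : α → String) (l : List α) : ∀ (s : String),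
    l.foldl (fun a x => a ++ g x) s = s ++ l.foldl (fun a x => a ++ g x) "" := by
  induction l with
  | nil => intro s; simp [List.foldl]
  | cons x l ih =>
    intro s
    simp only [List.foldl]
    rw [ih (s ++ g x), ih ("" ++ g x), String.empty_append, String.append_assoc]

theorem pv_shift {α : Type} (f : String → α → String) (g : α → String)
    (hf : ∀ a x, f a x = a ++ g x) (l : List α) (s : String) :
    l.foldl f s = s ++ l.foldl (fun a x => a ++ g x) "" := by
  rw [show f = fun a x => a ++ g x from funext fun a => funext fun x => hf a x]
  exact pv_shift0 g l s

theorem pv_foldl_max_cast {α : Type} (g : α → Nat) (t : List α) : ∀ (a : Nat),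
    List.foldl max ((a : Nat) : Int) (t.map (fun k => ((g k : Nat) : Int))) =
      ((t.foldl (fun m k => max m (g k)) a : Nat) : Int) := by
  induction t with
  | nil => intro a; rfl
  | cons x t ih =>
    intro a
    simp only [List.map_cons, List.foldl, ← Nat.cast_max, ih (max a (g x))]

-- zip of the per-row cell lists with one padded column = appending that column's cell to every row
theorem pv_zip_pad (col : List String) (n : Nat) (hle : col.length ≤ n) (f : Nat → List String) :
    ((List.range n).map f).zipWith (fun r c => r ++ [c])
      (col.map (fun x => "<td>" ++ x ++ "</td>") ++ List.replicate (n - col.length) "<td></td>")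
    = (List.range n).map (fun i => f i ++ [pvCell i col]) := by
  apply List.ext_getElem
  · simp; omega
  · intro i h1 h2
    have hi : i < n := by simpa using h2
    rw [List.getElem_zipWith, List.getElem_map, List.getElem_range]
    rw [List.getElem_map, List.getElem_range]
    congr 1
    by_cases hc : i < col.length
    · rw [List.getElem_append_left (by simpa using hc), List.getElem_map]
      simp [pvCell, hc]
    · rw [List.getElem_append_right (by simpa using hc), List.getElem_replicate]
      have : col.getD i "" = "" := List.getD_eq_default _ _ (by omega)
      rw [pvCell, this, show ("<td>" ++ "" ++ "</td>" : String) = "<td></td>" from by decide]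

-- the column-major fold invariant: header grows by <th>k</th>, row i's cell list by pvCell i col
theorem pv_bfold (its : List (String × List String)) (n : Nat) :
    (∀ kv ∈ its, kv.2.length ≤ n) → ∀ (h : String) (f : Nat → List String),
    its.foldl (fun (p : String × List (List String)) kv =>
        (p.1 ++ "<th>" ++ kv.1 ++ "</th>",
         p.2.zipWith (fun r c => r ++ [c])
           (kv.2.map (fun x => "<td>" ++ x ++ "</td>")
            ++ List.replicate (n - kv.2.length) "<td></td>")))
      (h, (List.range n).map f)
    = (its.foldl (fun a (kv : String × List String) => a ++ "<th>" ++ kv.1 ++ "</th>") h,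
       (List.range n).map (fun i => f i ++ its.map (fun kv => pvCell i kv.2))) := by
  induction its with
  | nil => intro _ h f; simp [List.foldl]
  | cons kv t ih =>
    intro hb h f
    simp only [List.foldl]
    rw [pv_zip_pad kv.2 n (hb kv (List.mem_cons_self)) f]
    rw [ih (fun x hx => hb x (List.mem_cons_of_mem _ hx)) _ (fun i => f i ++ [pvCell i kv.2])]
    refine Prod.ext rfl ?_
    refine List.map_congr_left fun i _ => ?_
    simp [List.append_assoc]

theorem pv_main (dict : List (String × List String)) (h : dict ≠ []) :
    gen_html_table_file dict = gen_html_table_file_alt dict := by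
  obtain ⟨p, rest, rfl⟩ := List.exists_cons_of_ne_nil h
  simp only [gen_html_table_file, gen_html_table_file_alt]
  set d := PySem.Dict.ofList (p :: rest) with hd
  have hnd : d.keys.Nodup := PySem.Dict.nodup_keys_ofList _
  have hV : d.values = d.keys.map (fun k => d.getD k []) := PySem.Dict.values_eq_map_keys d hnd []
  have hKne : d.keys ≠ [] := by
    have h1 : d.keys = PySem.Set.update PySem.Dict.empty.keys ((p :: rest).map Prod.fst) :=
      PySem.Dict.keys_foldl_insert_key (ν := List String) (p :: rest) Prod.fst (fun _ x => x.2)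
        PySem.Dict.empty
    rw [h1, PySem.Dict.keys_empty, PySem.Set.update_nil_left, List.map_cons, PySem.Set.ofList_cons]
    simp
  obtain ⟨a, kt, hK⟩ := List.exists_cons_of_ne_nil hKne
  have hmax : (PySem.List.max? (d.keys.map (fun k => ((d.getD k []).length : Int))) (fun y => y)).getD 0
      = ((kt.foldl (fun m k => max m ((d.getD k []).length)) ((d.getD a []).length) : Nat) : Int) := by
    rw [hK, List.map_cons, PySem.List.max?_id_cons, Option.getD_some]
    exact pv_foldl_max_cast (fun k => (d.getD k []).length) kt ((d.getD a []).length)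
  set M0 : Nat := kt.foldl (fun m k => max m ((d.getD k []).length)) ((d.getD a []).length) with hM0
  -- B's n equals M0 (same list of lengths, via values = keys.map getD)
  have hmaxB : (((PySem.List.max? (d.values.map (fun v => (v.length : Int))) (fun y => y)).getD 0).toNat) = M0 := by
    rw [hV, List.map_map]
    rw [show ((fun v : List String => (v.length : Int)) ∘ fun k => d.getD k [])
        = fun k => ((d.getD k []).length : Int) from rfl]
    rw [hmax, Int.toNat_natCast]
  -- every column length is bounded by M0
  have hM0' : M0 = d.keys.foldl (fun m k => max m ((d.getD k []).length)) 0 := by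
    rw [hK, List.foldl, Nat.zero_max]
  have hbound : ∀ kv ∈ d.items, kv.2.length ≤ M0 := by
    intro kv hkv
    have hk : kv.2 = d.getD kv.1 [] :=
      (PySem.Dict.getD_of_mem_items (d := d) (k := kv.1) (v := kv.2) (by simpa using hkv) hnd []).symm
    have hmem : kv.1 ∈ d.keys := by
      have : kv.1 ∈ d.items.map Prod.fst := List.mem_map_of_mem hkv
      simpa [PySem.Dict.keys] using this
    rw [hk, hM0']
    exact (PySem.List.le_foldl_max_nat d.keys (fun k => (d.getD k []).length) 0).2 kv.1 hmem
  rw [hmax, hmaxB]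
  -- A side: rewrite the range loop into foldl over List.range M0 of pvRowStr
  have houter : ∀ (F : String → Int → String) (init : String),
      (PySem.List.pyRange 0 (M0 : Int) 1).foldl F init =
        (List.range M0).foldl (fun (t : String) (k : Nat) => F t (k : Int)) init := by
    intro F init
    rw [PySem.List.pyRange_one, show ((M0 : Int) - 0).toNat = M0 from by omega, List.foldl_map]
    exact congrArg (fun f => List.foldl f init (List.range M0))
      (funext fun t => funext fun k => by rw [zero_add])
  rw [houter]
  have hcell : ∀ (n : Nat) (b k : String),
      (if ((d.getD k []).length : Int) ≤ (n : Int) then b ++ "<td></td>"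
       else b ++ "<td>" ++ PySem.List.pyGetD (d.getD k []) (n : Int) "" ++ "</td>")
        = b ++ pvCell n (d.getD k []) := by
    intro n b k
    by_cases hle : (d.getD k []).length ≤ n
    · rw [if_pos (by exact_mod_cast hle)]
      simp only [pvCell, List.getD_eq_default _ _ hle]
      rw [show ("<td>" ++ "" ++ "</td>" : String) = "<td></td>" from by decide]
    · rw [if_neg (by exact_mod_cast hle)]
      simp [pvCell, PySem.List.pyGetD_natCast, String.append_assoc]
  have hrowA : ∀ (t : String) (n : Nat),
      (d.keys.foldl (fun t k =>
          if ((d.getD k []).length : Int) ≤ (n : Int) then t ++ "<td></td>"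
          else t ++ "<td>" ++ PySem.List.pyGetD (d.getD k []) (n : Int) "" ++ "</td>")
        (t ++ "<tr>")) ++ "</tr>" = t ++ pvRowStr d.values n := by
    intro t n
    rw [pv_shift _ (fun k => pvCell n (d.getD k [])) (hcell n) d.keys (t ++ "<tr>")]
    simp only [pvRowStr, hV, List.foldl_map]
    simp [String.append_assoc]
  rw [show (fun (t : String) (k : Nat) =>
      (d.keys.foldl (fun t k_1 =>
          if ((d.getD k_1 []).length : Int) ≤ (k : Int) then t ++ "<td></td>"
          else t ++ "<td>" ++ PySem.List.pyGetD (d.getD k_1 []) (k : Int) "" ++ "</td>")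
        (t ++ "<tr>")) ++ "</tr>") = fun t k => t ++ pvRowStr d.values k from
    funext fun t => funext fun k => hrowA t k]
  rw [pv_shift _ (fun k => pvRowStr d.values k) (fun _ _ => rfl) (List.range M0)]
  -- B side: unfold the column-major fold with the invariant, then its body loop
  have hrepl : List.replicate M0 ([] : List String) = (List.range M0).map (fun _ => []) := by
    simp [List.map_const']
  rw [hrepl, pv_bfold d.items M0 hbound "" (fun _ => [])]
  -- the B body loop over the finished rows
  rw [List.foldl_map]
  have hrowB : (fun (t : String) (i : Nat) =>
        (((fun _ => ([] : List String)) i ++ d.items.map (fun kv => pvCell i kv.2)).foldl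
            (fun t c => t ++ c) (t ++ "<tr>")) ++ "</tr>")
      = fun t i => t ++ pvRowStr d.values i := by
    funext t i
    rw [List.nil_append,
      pv_shift (fun t c => t ++ c) (fun c => c) (fun _ _ => rfl) _ (t ++ "<tr>"),
      List.foldl_map]
    have : d.items.foldl (fun (a : String) kv => a ++ pvCell i kv.2) ""
        = d.values.foldl (fun b c => b ++ pvCell i c) "" := by
      rw [show d.values = d.items.map Prod.snd from rfl, List.foldl_map]
    rw [this]
    simp [pvRowStr, String.append_assoc]
  rw [hrowB]
  rw [pv_shift _ (fun k => "<th>" ++ (k ++ "</th>")) (fun a x => by simp [String.append_assoc])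
    d.keys "<table class=\"table\"><tr>"]
  have hHB : d.items.foldl (fun a (kv : String × List String) => a ++ "<th>" ++ kv.1 ++ "</th>") ""
      = d.keys.foldl (fun a k => a ++ "<th>" ++ k ++ "</th>") "" := by
    rw [show d.keys = d.items.map Prod.fst from rfl, List.foldl_map]
  rw [hHB]
  rw [pv_shift _ (fun k => "<th>" ++ (k ++ "</th>")) (fun a x => by simp)
    d.keys ""]
  conv_rhs => rw [pv_shift0 (fun k => pvRowStr d.values k) (List.range M0)]
  simp [String.append_assoc]

-- ===== VERDICT (by name: the statement is the Claim_ definition above) =====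
theorem gen_html_table_file_spec : Claim_equal_gen_html_table_file := by
  intro dict _ hpre
  unfold Spec_gen_html_table_file
  exact pv_main dict hpre
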